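-- pv_equiv track=rewrite | github.com/kiosvantra/metronous | .github/scripts/bump-version.py | render_notes
-- ===== SOURCE A (Python) =====
-- from typing import List, Optional, Tuple
--
-- def render_notes(sections: dict, previous: Optional[str], new: str) -> str:
--     lines = []
--     lines.append(f"## Release {new}")
--     if previous:
--         lines.append(f"Previous: {previous}")
--     lines.append("")
--
--     order = ["Added", "Fixed", "Changed", "Breaking"]
--     for k in order:
--         items = sections.get(k, [])
--         if not items:
--             continue
--         lines.append(f"### {k}")
--         lines.extend(items)
--         lines.append("")
--
--     return "\n".join(lines).strip() + "\n"
-- ===== SOURCE B (Python) =====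
-- def render_notes(sections: dict, previous, new: str) -> str:
--     # Index-and-sort: scan the dict's own items once, tag each kept section
--     # with its rank, then sort by rank -- instead of probing four fixed keys.
--     rank = {"Added": 0, "Fixed": 1, "Changed": 2, "Breaking": 3}
--     picked = sorted(
--         ((rank[k], "### " + k + "\n" + "\n".join(v))
--          for k, v in sections.items() if k in rank and v),
--         key=lambda p: p[0],
--     )
--     head = "## Release " + new
--     if previous:
--         head += "\nPrevious: " + previous
--     return "\n\n".join([head] + [b for _, b in picked]).strip() + "\n"
-- ===== Notes on version B (the rewrite author's own statement) =====
-- stated objective: alternative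
-- what changed: B inverts the traversal: instead of probing the four fixed section names against the dict, it scans sections.items() once, tags each kept section with its rank from a rank index, sorts the picked (rank, block) pairs, and joins header plus blocks with a double newline (no blank-line sentinels).
import Mathlib
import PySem

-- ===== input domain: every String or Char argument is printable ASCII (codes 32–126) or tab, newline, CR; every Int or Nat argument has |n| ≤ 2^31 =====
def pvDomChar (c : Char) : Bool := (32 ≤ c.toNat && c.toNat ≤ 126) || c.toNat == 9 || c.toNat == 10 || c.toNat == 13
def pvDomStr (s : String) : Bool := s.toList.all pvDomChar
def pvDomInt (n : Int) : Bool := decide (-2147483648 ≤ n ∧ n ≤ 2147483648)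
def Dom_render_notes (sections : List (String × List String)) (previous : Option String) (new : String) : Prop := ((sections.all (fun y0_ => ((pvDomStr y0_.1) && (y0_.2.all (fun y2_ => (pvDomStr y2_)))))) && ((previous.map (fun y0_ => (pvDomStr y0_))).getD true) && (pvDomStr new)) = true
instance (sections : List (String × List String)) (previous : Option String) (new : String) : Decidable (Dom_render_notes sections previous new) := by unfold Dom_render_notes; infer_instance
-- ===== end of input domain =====

-- B inverts the traversal: it scans the dict's items once, tags each kept section with its
-- rank from a rank index, sorts the picked (rank, block) pairs and joins header + blocks
-- with double newlines; same return value as A on every dict input.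

-- ===== PORT A =====
def render_notes (sections : List (String × List String)) (previous : Option String) (new : String) : String :=
  let d := PySem.Dict.mk sections
  let lines : List String := ["## Release " ++ new]
  let lines := match previous with        -- 'if previous:' — None and "" are falsy
    | some p => if p ≠ "" then lines ++ ["Previous: " ++ p] else lines
    | none => lines
  let lines := lines ++ [""]
  let lines := ["Added", "Fixed", "Changed", "Breaking"].foldl (fun lines k =>
      let items := PySem.Dict.getD d k []
      if items = [] then lines
      else ((lines ++ ["### " ++ k]) ++ items) ++ [""]) lines
  PySem.Str.strip (PySem.Str.join "\n" lines) ++ "\n"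

-- ===== PORT B =====
-- rank = {"Added": 0, "Fixed": 1, "Changed": 2, "Breaking": 3}
def pvRank : PySem.Dict String Int :=
  PySem.Dict.mk [("Added", 0), ("Fixed", 1), ("Changed", 2), ("Breaking", 3)]

def render_notes_alt (sections : List (String × List String)) (previous : Option String) (new : String) : String :=
  -- 'for k, v in sections.items() if k in rank and v' — the parameter IS the items list
  let picked := PySem.List.sorted
    (sections.filterMap (fun kv =>
      match PySem.Dict.get? pvRank kv.1 with
      | some r => if kv.2 = [] then none
                  else some ((r, "### " ++ kv.1 ++ "\n" ++ PySem.Str.join "\n" kv.2) : Int × String)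
      | none => none))
    (fun p => p.1) false
  let head := "## Release " ++ new ++ (match previous with
    | some p => if p ≠ "" then "\nPrevious: " ++ p else ""
    | none => "")
  PySem.Str.strip (PySem.Str.join "\n\n" (head :: picked.map Prod.snd)) ++ "\n"

-- ===== PRECONDITION & SPEC =====
-- Pre_ excludes association lists with duplicate keys: they do not represent a Python dict
-- (A's 'sections' parameter is a dict, where duplicate keys cannot occur), and which of the
-- duplicated entries counts is an accident of the encoding.
def Pre_render_notes (sections : List (String × List String)) (previous : Option String) (new : String) : Prop :=
  (sections.map Prod.fst).Nodup
instance (sections : List (String × List String)) (previous : Option String) (new : String) : Decidable (Pre_render_notes sections previous new) := by unfold Pre_render_notes; infer_instance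

def pvWitness_render_notes : (List (String × List String)) × Option String × String :=
  ([("Added", ["x"]), ("Fixed", ["y", "z"])], some "0.9", "1.0")

def Spec_render_notes (sections : List (String × List String)) (previous : Option String) (new : String) (out : String) : Prop := out = render_notes_alt sections previous new
instance (sections : List (String × List String)) (previous : Option String) (new : String) (out : String) : Decidable (Spec_render_notes sections previous new out) := by unfold Spec_render_notes; infer_instance

-- ===== CLAIM (what is proved, stated in full; the proofs are below) =====
def Claim_equal_render_notes : Prop := ∀ (sections : List (String × List String)) (previous : Option String) (new : String), Dom_render_notes sections previous new → Pre_render_notes sections previous new → Spec_render_notes sections previous new (render_notes sections previous new)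

-- ===== LEMMAS AND PROOFS =====

-- B's per-item selection function (the lambda of render_notes_alt, named for the proofs)
def pvSel (kv : String × List String) : Option (Int × String) :=
  match PySem.Dict.get? pvRank kv.1 with
  | some r => if kv.2 = [] then none
              else some ((r, "### " ++ kv.1 ++ "\n" ++ PySem.Str.join "\n" kv.2) : Int × String)
  | none => none

-- the four section names with their ranks, in rank order
def pvOP : List (String × Int) := [("Added", 0), ("Fixed", 1), ("Changed", 2), ("Breaking", 3)]

-- the picked (rank, block) pairs listed in rank order
def pvT (d : PySem.Dict String (List String)) : List (Int × String) :=
  pvOP.filterMap (fun kr =>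
    if PySem.Dict.getD d kr.1 [] = [] then none
    else some (kr.2, "### " ++ kr.1 ++ "\n" ++ PySem.Str.join "\n" (PySem.Dict.getD d kr.1 [])))

-- the lines A appends for the suffix of keys ks
def pvTail (d : PySem.Dict String (List String)) (ks : List String) : List String :=
  ks.flatMap (fun k =>
    let items := PySem.Dict.getD d k []
    if items = [] then [] else (["### " ++ k] ++ items) ++ [""])

-- the blocks appearing in rank order (pvT without the ranks)
def pvBody (d : PySem.Dict String (List String)) (ks : List String) : List String :=
  ks.filterMap (fun k =>
    let v := PySem.Dict.getD d k []
    if v = [] then none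
    else some ("### " ++ k ++ "\n" ++ PySem.Str.join "\n" v))

lemma pv_foldA (d : PySem.Dict String (List String)) (ks : List String) (lines : List String) :
    ks.foldl (fun lines k =>
      let items := PySem.Dict.getD d k []
      if items = [] then lines
      else ((lines ++ ["### " ++ k]) ++ items) ++ [""]) lines = lines ++ pvTail d ks := by
  induction ks generalizing lines with
  | nil => simp [pvTail]
  | cons k ks ih =>
      simp only [List.foldl_cons, pvTail, List.flatMap_cons]
      by_cases h : PySem.Dict.getD d k [] = []
      · simp only [h, ih, pvTail]
        simp
      · simp only [h, ih, pvTail]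
        simp

lemma pv_tail_nil_iff (d : PySem.Dict String (List String)) (ks : List String) :
    pvTail d ks = [] ↔ pvBody d ks = [] := by
  induction ks with
  | nil => simp [pvTail, pvBody]
  | cons k ks ih =>
      by_cases h : PySem.Dict.getD d k [] = [] <;> simp [pvTail, pvBody, h] at *

lemma pv_join_cons_ne (sep p : List Char) (rest : List (List Char)) (h : rest ≠ []) :
    PySem.Chars.join sep (p :: rest) = p ++ sep ++ PySem.Chars.join sep rest := by
  cases rest with
  | nil => exact absurd rfl h
  | cons q r => exact PySem.Chars.join_cons_cons sep p q r

lemma pv_join_append (sep : List Char) (xs ys : List (List Char)) (hx : xs ≠ []) (hy : ys ≠ []) :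
    PySem.Chars.join sep (xs ++ ys) = PySem.Chars.join sep xs ++ sep ++ PySem.Chars.join sep ys := by
  induction xs with
  | nil => exact absurd rfl hx
  | cons x xs ih =>
      cases xs with
      | nil =>
          rw [List.singleton_append, pv_join_cons_ne sep x ys hy, PySem.Chars.join_singleton]
      | cons x' xs' =>
          rw [List.cons_append, pv_join_cons_ne sep x ((x' :: xs') ++ ys) (by simp),
              PySem.Chars.join_cons_cons, ih (by simp)]
          simp [List.append_assoc]

lemma pv_isspace_nl : PySem.Chars.isspace '\n' = true := by decide

lemma pv_strip_newline (l : List Char) :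
    PySem.Chars.strip (l ++ ['\n']) = PySem.Chars.strip l := by
  unfold PySem.Chars.strip PySem.Chars.lstrip PySem.Chars.rstrip
  rw [List.dropWhile_append]
  by_cases h : (List.dropWhile PySem.Chars.isspace l).isEmpty = true
  · rw [if_pos h]
    rw [List.isEmpty_iff] at h
    simp [h, List.dropWhile, pv_isspace_nl]
  · rw [if_neg h]
    rw [List.reverse_append]
    simp [pv_isspace_nl]

-- pvRank's lookup is injective: equal ranks come from the same key
lemma pv_rank_inj {k1 k2 : String} {r : Int}
    (h1 : PySem.Dict.get? pvRank k1 = some r) (h2 : PySem.Dict.get? pvRank k2 = some r) :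
    k1 = k2 := by
  simp only [pvRank, PySem.Dict.get?_mk_cons] at h1 h2
  split_ifs at h1 h2 <;> simp_all [PySem.Dict.get?] <;> omega

-- the picked pairs have strictly increasing ranks
lemma pv_T_pairwise (d : PySem.Dict String (List String)) :
    (pvT d).Pairwise (fun a b => a.1 < b.1) := by
  unfold pvT pvOP
  simp only [List.filterMap_cons, List.filterMap_nil]
  split_ifs <;> simp [List.pairwise_cons]

lemma pv_T_map_snd (d : PySem.Dict String (List String)) :
    (pvT d).map Prod.snd = pvBody d ["Added", "Fixed", "Changed", "Breaking"] := by
  unfold pvT pvOP pvBody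
  simp only [List.filterMap_cons, List.filterMap_nil]
  split_ifs <;> simp

-- membership correspondence between B's scan of the items and the rank-ordered list
lemma pv_mem_iff (sections : List (String × List String))
    (h : (sections.map Prod.fst).Nodup) (x : Int × String) :
    x ∈ sections.filterMap pvSel ↔ x ∈ pvT (PySem.Dict.mk sections) := by
  have hkeys : (PySem.Dict.mk sections).keys.Nodup := h
  have hitems : (PySem.Dict.mk sections).items = sections := rfl
  constructor
  · rintro hx
    rw [List.mem_filterMap] at hx
    obtain ⟨⟨k, v⟩, hmem, hsel⟩ := hx
    unfold pvSel at hsel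
    rcases hr : PySem.Dict.get? pvRank k with _ | r
    · rw [hr] at hsel; simp at hsel
    · rw [hr] at hsel
      dsimp only at hsel
      by_cases hv : v = []
      · simp [hv] at hsel
      · rw [if_neg hv] at hsel
        have hgd : PySem.Dict.getD (PySem.Dict.mk sections) k [] = v :=
          PySem.Dict.getD_of_mem_items _ hmem hkeys []
        simp only [Option.some.injEq] at hsel
        -- k is one of the four names, with its rank
        have hk : (k = "Added" ∧ r = 0) ∨ (k = "Fixed" ∧ r = 1) ∨
            (k = "Changed" ∧ r = 2) ∨ (k = "Breaking" ∧ r = 3) := by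
          simp only [pvRank, PySem.Dict.get?_mk_cons] at hr
          split_ifs at hr <;> simp_all [PySem.Dict.get?]
        unfold pvT pvOP
        rw [List.mem_filterMap]
        rcases hk with ⟨hke, hre⟩ | ⟨hke, hre⟩ | ⟨hke, hre⟩ | ⟨hke, hre⟩ <;> subst hke <;> subst hre
        · exact ⟨("Added", 0), by simp, by
            dsimp only; rw [if_neg (by rw [hgd]; exact hv)]; rw [hgd, ← hsel]⟩
        · exact ⟨("Fixed", 1), by simp, by
            dsimp only; rw [if_neg (by rw [hgd]; exact hv)]; rw [hgd, ← hsel]⟩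
        · exact ⟨("Changed", 2), by simp, by
            dsimp only; rw [if_neg (by rw [hgd]; exact hv)]; rw [hgd, ← hsel]⟩
        · exact ⟨("Breaking", 3), by simp, by
            dsimp only; rw [if_neg (by rw [hgd]; exact hv)]; rw [hgd, ← hsel]⟩
  · intro hx
    unfold pvT pvOP at hx
    rw [List.mem_filterMap] at hx
    obtain ⟨⟨k, r⟩, hkr, hsome⟩ := hx
    by_cases hgd0 : PySem.Dict.getD (PySem.Dict.mk sections) k [] = []
    · rw [if_pos hgd0] at hsome; cases hsome
    · rw [if_neg hgd0] at hsome
      set v := PySem.Dict.getD (PySem.Dict.mk sections) k [] with hv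
      have hget : PySem.Dict.get? (PySem.Dict.mk sections) k = some v := by
        rcases hg : PySem.Dict.get? (PySem.Dict.mk sections) k with _ | w
        · exact absurd (by rw [hv, PySem.Dict.getD_eq_get?_getD, hg]; rfl) hgd0
        · rw [hv, PySem.Dict.getD_eq_get?_getD, hg]; rfl
      have hmem : (k, v) ∈ sections := by
        rw [← hitems]; exact PySem.Dict.mem_items_of_get?_eq_some _ hget
      rw [List.mem_filterMap]
      refine ⟨(k, v), hmem, ?_⟩
      unfold pvSel
      have hrk : PySem.Dict.get? pvRank k = some r := by
        simp only [List.mem_cons, List.not_mem_nil, or_false] at hkr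
        rcases hkr with hkr | hkr | hkr | hkr <;> rw [Prod.mk.injEq] at hkr <;>
          rcases hkr with ⟨hke, hre⟩ <;> subst hke <;> subst hre <;> rfl
      dsimp only
      rw [hrk]
      dsimp only at hsome ⊢
      rw [if_neg hgd0, ← hsome]
  -- (no more goals)

-- B's picked list is nodup: distinct keys give distinct ranks
lemma pv_sel_nodup (sections : List (String × List String))
    (h : (sections.map Prod.fst).Nodup) : (sections.filterMap pvSel).Nodup := by
  have hpw : sections.Pairwise (fun p q => p.1 ≠ q.1) := by
    rw [List.Nodup, List.pairwise_map] at h; exact h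
  rw [List.Nodup, List.pairwise_filterMap]
  refine hpw.imp ?_
  rintro ⟨k1, v1⟩ ⟨k2, v2⟩ hne x hx y hy heq
  subst heq
  apply hne
  unfold pvSel at hx hy
  rcases h1 : PySem.Dict.get? pvRank k1 with _ | r1 <;> rw [h1] at hx
  · simp at hx
  rcases h2 : PySem.Dict.get? pvRank k2 with _ | r2 <;> rw [h2] at hy
  · simp at hy
  by_cases hv1 : v1 = []
  · dsimp only at hx; simp [hv1] at hx
  by_cases hv2 : v2 = []
  · dsimp only at hy; simp [hv2] at hy
  dsimp only at hx hy
  rw [if_neg hv1] at hx; rw [if_neg hv2] at hy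
  simp only [Option.some.injEq] at hx hy
  have hr1 : x.1 = r1 := by rw [← hx]
  have hr2 : x.1 = r2 := by rw [← hy]
  exact pv_rank_inj (hr1 ▸ h1) (hr2 ▸ h2)

-- the sorted picked list IS the rank-ordered list
lemma pv_picked (sections : List (String × List String))
    (h : (sections.map Prod.fst).Nodup) :
    PySem.List.sorted (sections.filterMap pvSel) (fun p => p.1) false
      = pvT (PySem.Dict.mk sections) := by
  apply PySem.List.sorted_eq_of_perm_of_pairwise_lt
  · have hnT : (pvT (PySem.Dict.mk sections)).Nodup :=
      (pv_T_pairwise _).imp (fun {a b} hlt heq => by rw [heq] at hlt; exact lt_irrefl _ hlt)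
    exact (List.perm_ext_iff_of_nodup hnT (pv_sel_nodup sections h)).2
      (fun x => (pv_mem_iff sections h x).symm)
  · exact pv_T_pairwise _

-- main correspondence: A's joined tail lines = joined body blocks plus a trailing newline
lemma pv_main (d : PySem.Dict String (List String)) (ks : List String)
    (h : pvTail d ks ≠ []) :
    PySem.Chars.join ['\n'] ((pvTail d ks).map String.toList)
      = PySem.Chars.join ['\n', '\n'] ((pvBody d ks).map String.toList) ++ ['\n'] := by
  induction ks with
  | nil => exact absurd (by simp [pvTail]) h
  | cons k ks ih =>
      by_cases hk : PySem.Dict.getD d k [] = []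
      · have ht : pvTail d (k :: ks) = pvTail d ks := by simp [pvTail, hk]
        have hb : pvBody d (k :: ks) = pvBody d ks := by simp [pvBody, hk]
        rw [ht, hb]
        exact ih (by rw [ht] at h; exact h)
      · set I := PySem.Dict.getD d k [] with hI
        have hImap : I.map String.toList ≠ [] := by
          simp only [ne_eq, List.map_eq_nil_iff]; exact hk
        have ht : pvTail d (k :: ks) = ((["### " ++ k] ++ I) ++ [""]) ++ pvTail d ks := by
          simp [pvTail, hk, ← hI]
        have hb : pvBody d (k :: ks)
            = ("### " ++ k ++ "\n" ++ PySem.Str.join "\n" I) :: pvBody d ks := by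
          simp [pvBody, hk, ← hI]
        have hbc : ("### " ++ k ++ "\n" ++ PySem.Str.join "\n" I).toList
            = ("### " ++ k).toList ++ ['\n'] ++ PySem.Chars.join ['\n'] (I.map String.toList) := by
          simp [String.toList_append, PySem.Str.toList_join]
        have hblk : PySem.Chars.join ['\n'] ((((["### " ++ k] ++ I) ++ [""]).map String.toList))
            = ("### " ++ k).toList ++ ['\n'] ++ PySem.Chars.join ['\n'] (I.map String.toList) ++ ['\n'] := by
          rw [List.map_append, List.map_append,
              pv_join_append ['\n'] _ ([""].map String.toList) (by simp only [ne_eq,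
                List.append_eq_nil_iff, List.map_eq_nil_iff, not_and]; intro _ hc; exact hk hc)
                (by simp)]
          rw [pv_join_append ['\n'] (["### " ++ k].map String.toList) (I.map String.toList) (by simp) hImap]
          simp [PySem.Chars.join_singleton]
        by_cases htail : pvTail d ks = []
        · have hbody : pvBody d ks = [] := (pv_tail_nil_iff d ks).mp htail
          rw [ht, hb, htail, hbody]
          simp only [List.append_nil, List.map_cons, List.map_nil, PySem.Chars.join_singleton]
          rw [hblk, hbc]
        · have hbody : pvBody d ks ≠ [] := fun hh => htail ((pv_tail_nil_iff d ks).mpr hh)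
          rw [ht, hb]
          rw [List.map_append,
              pv_join_append ['\n'] _ ((pvTail d ks).map String.toList)
                (by simp) (by simp [htail]),
              hblk, ih htail]
          rw [List.map_cons,
              pv_join_cons_ne ['\n', '\n'] _ ((pvBody d ks).map String.toList)
                (by simp [hbody]), hbc]
          simp [List.append_assoc]

lemma pv_top (d : PySem.Dict String (List String)) (hl : List String) (hdr : String)
    (ks : List String) (hhl_ne : hl ≠ [])
    (hhj : PySem.Chars.join ['\n'] (hl.map String.toList) = hdr.toList) :
    PySem.Chars.strip (PySem.Chars.join ['\n'] (((hl ++ [""]) ++ pvTail d ks).map String.toList))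
      = PySem.Chars.strip (PySem.Chars.join ['\n', '\n'] ((hdr :: pvBody d ks).map String.toList)) := by
  by_cases htail : pvTail d ks = []
  · have hbody : pvBody d ks = [] := (pv_tail_nil_iff d ks).mp htail
    rw [htail, hbody]
    rw [List.append_nil, List.map_append,
        pv_join_append ['\n'] _ _ (by simp [hhl_ne]) (by simp)]
    simp only [List.map_cons, List.map_nil, PySem.Chars.join_singleton, hhj]
    have h2 : hdr.toList ++ ['\n'] ++ ("" : String).toList = hdr.toList ++ ['\n'] := by simp
    rw [h2, pv_strip_newline]
  · have hbody : pvBody d ks ≠ [] := fun hh => htail ((pv_tail_nil_iff d ks).mpr hh)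
    have key : PySem.Chars.join ['\n'] (((hl ++ [""]) ++ pvTail d ks).map String.toList)
        = PySem.Chars.join ['\n', '\n'] ((hdr :: pvBody d ks).map String.toList) ++ ['\n'] := by
      rw [List.append_assoc, List.map_append,
          pv_join_append ['\n'] _ _ (by simp [hhl_ne]) (by simp),
          hhj, List.map_append]
      simp only [List.map_cons, List.map_nil, List.singleton_append]
      rw [pv_join_cons_ne ['\n'] _ _ (by simp [htail]),
          pv_main d _ htail,
          pv_join_cons_ne ['\n', '\n'] _ _ (by simp [hbody, List.map_eq_nil_iff])]
      simp [List.append_assoc]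
    rw [key, pv_strip_newline]

-- ===== VERDICT (by name: the statement is the Claim_ definition above) =====
theorem render_notes_spec : Claim_equal_render_notes := by
  intro sections previous new _ hpre
  unfold Spec_render_notes render_notes render_notes_alt
  set d := PySem.Dict.mk sections with hd
  simp only [pv_foldA]
  apply congrArg (fun s => s ++ "\n")
  apply String.toList_inj.mp
  rw [PySem.Str.toList_strip, PySem.Str.toList_strip, PySem.Str.toList_join, PySem.Str.toList_join]
  have hnl : ("\n" : String).toList = ['\n'] := by decide
  have hnl2 : ("\n\n" : String).toList = ['\n', '\n'] := by decide
  rw [hnl, hnl2]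
  have hBsel : (sections.filterMap (fun kv =>
      match PySem.Dict.get? pvRank kv.1 with
      | some r => if kv.2 = [] then none
                  else some ((r, "### " ++ kv.1 ++ "\n" ++ PySem.Str.join "\n" kv.2) : Int × String)
      | none => none)) = sections.filterMap pvSel := rfl
  rw [hBsel, pv_picked sections hpre, pv_T_map_snd]
  apply pv_top
  · cases previous with
    | none => simp
    | some p => by_cases hp : p = "" <;> simp [hp]
  · cases previous with
    | none => simp [PySem.Chars.join_singleton]
    | some p =>
        by_cases hp : p = ""
        · simp [hp, PySem.Chars.join_singleton]
        · simp only [ne_eq, hp, not_false_eq_true, if_pos, List.map_cons,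
            List.map_nil, List.singleton_append, PySem.Chars.join_cons_cons,
            PySem.Chars.join_singleton, String.toList_append]
          simp
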